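-- pv_equiv track=rewrite | github.com/MrChepe09/Competitive-Programming-Codes | Codechef June Challenge 2020/TTUPLE.py | ttuple
-- ===== SOURCE A (Python) =====
-- def ttuple(ini, tar):
--   diff = [0]*3
--   for i in range(3):
--     diff[i] = ini[i]-tar[i]
--   c = diff.count(0)
--   #0 Case
--   if(diff[0] == 0 and diff[1] == 0 and diff[2] == 0):
--     return 0
--
--   #1 Case
--   if((diff[0] == 0 and diff[1] == 0 and diff[2] != 0) or
--        (diff[0] == 0 and diff[1] != 0 and diff[2] == 0) or
--        (diff[0] != 0 and diff[1] == 0 and diff[2] == 0)):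
--     return 1
--   if(diff[0]==diff[1] and diff[1]==diff[2]):
--     return 1
--
--   #2 Case
--   #(+, +)
--   if((diff[0]==diff[1] and diff[1]!=diff[2]) or
--        (diff[0]==diff[2] and diff[1]!=diff[2]) or
--        (diff[1]==diff[2] and diff[0]!=diff[2])):
--     return 2
--   if((diff[0]==0 and diff[1]!=diff[2]) or
--      (diff[1]==0 and diff[0]!=diff[2]) or
--      (diff[2]==0 and diff[1]!=diff[0])):
--     return 2
--
--   #(+, *)
--
--   #(*, +)
--
--   #(*, *)
--
--
--
--
--
--
--
--
--   #3 Case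
--   return 3
-- ===== SOURCE B (Python) =====
-- def ttuple(ini, tar):
--   counts = {}
--   for i in range(3):
--     v = ini[i] - tar[i]
--     counts[v] = counts.get(v, 0) + 1
--   z = counts.pop(0, 0)
--   sig = (z,) + tuple(sorted(counts.values()))
--   table = {(3,): 0, (2, 1): 1, (0, 3): 1, (1, 2): 2, (1, 1, 1): 2, (0, 1, 2): 2, (0, 1, 1, 1): 3}
--   return table[sig]
-- ===== Notes on version B (the rewrite author's own statement) =====
-- stated objective: alternative
-- what changed: B replaces A's cascade of explicit pairwise comparisons with a histogram of the three differences: it builds a value->count dict, pops the zero count, forms a canonical signature (zeros, sorted nonzero multiplicities) and reads the answer from a 7-entry lookup table, with no comparison branches at all.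
import Mathlib
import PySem

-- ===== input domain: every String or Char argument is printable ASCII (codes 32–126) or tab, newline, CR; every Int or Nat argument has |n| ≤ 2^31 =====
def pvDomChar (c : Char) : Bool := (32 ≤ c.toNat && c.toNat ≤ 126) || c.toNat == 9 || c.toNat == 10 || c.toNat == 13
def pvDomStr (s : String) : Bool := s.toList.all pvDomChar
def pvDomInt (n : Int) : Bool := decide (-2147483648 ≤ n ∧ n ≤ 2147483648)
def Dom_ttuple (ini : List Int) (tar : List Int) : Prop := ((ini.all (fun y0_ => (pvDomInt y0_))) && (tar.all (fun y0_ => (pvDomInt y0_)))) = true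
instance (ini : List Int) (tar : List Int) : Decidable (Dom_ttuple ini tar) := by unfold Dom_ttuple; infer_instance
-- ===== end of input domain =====

-- B replaces A's comparison cascade with a histogram of the differences, a canonical
-- signature (zero count, sorted nonzero multiplicities) and a 7-entry lookup table;
-- objective: alternative (same cost, different structure).


-- ===== PORT A =====
-- literal transliteration of A; ini[i]/tar[i] via pyGet? (in range under Pre_, .getD 0 never fires there);
-- A's variable c = diff.count(0) is computed but never used, so it is omitted
def ttuple (ini : List Int) (tar : List Int) : Int :=
  let d0 := (PySem.List.pyGet? ini 0).getD 0 - (PySem.List.pyGet? tar 0).getD 0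
  let d1 := (PySem.List.pyGet? ini 1).getD 0 - (PySem.List.pyGet? tar 1).getD 0
  let d2 := (PySem.List.pyGet? ini 2).getD 0 - (PySem.List.pyGet? tar 2).getD 0
  if d0 = 0 ∧ d1 = 0 ∧ d2 = 0 then 0
  else if (d0 = 0 ∧ d1 = 0 ∧ d2 ≠ 0) ∨ (d0 = 0 ∧ d1 ≠ 0 ∧ d2 = 0) ∨ (d0 ≠ 0 ∧ d1 = 0 ∧ d2 = 0) then 1
  else if d0 = d1 ∧ d1 = d2 then 1
  else if (d0 = d1 ∧ d1 ≠ d2) ∨ (d0 = d2 ∧ d1 ≠ d2) ∨ (d1 = d2 ∧ d0 ≠ d2) then 2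
  else if (d0 = 0 ∧ d1 ≠ d2) ∨ (d1 = 0 ∧ d0 ≠ d2) ∨ (d2 = 0 ∧ d1 ≠ d0) then 2
  else 3

-- ===== PORT B =====
-- transliteration of Source B: histogram dict, pop the zero count, canonical signature
-- (z, sorted multiplicities) as a List Int, then first-match lookup in the literal table;
-- the signature is always a key of the table, so the KeyError branch (.getD 0) never fires
def ttuple_alt (ini : List Int) (tar : List Int) : Int :=
  let counts := (PySem.List.pyRange 0 3 1).foldl (fun d i =>
    let v := (PySem.List.pyGet? ini i).getD 0 - (PySem.List.pyGet? tar i).getD 0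
    d.insert v (d.getD v 0 + 1)) (PySem.Dict.empty : PySem.Dict Int Int)
  let z := counts.getD 0 0           -- counts.pop(0, 0): the value …
  let counts := counts.erase 0       -- … and the removal
  let sig : List Int := z :: PySem.List.sorted counts.values (fun x => x) false
  let table : PySem.Dict (List Int) Int :=
    PySem.Dict.ofList [([3], 0), ([2, 1], 1), ([0, 3], 1), ([1, 2], 2), ([1, 1, 1], 2), ([0, 1, 2], 2), ([0, 1, 1, 1], 3)]
  (table.get? sig).getD 0

-- ===== PRECONDITION & SPEC =====
-- A indexes ini[0..2] and tar[0..2]: shorter lists raise IndexError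
def Pre_ttuple (ini : List Int) (tar : List Int) : Prop := 3 ≤ ini.length ∧ 3 ≤ tar.length
instance (ini : List Int) (tar : List Int) : Decidable (Pre_ttuple ini tar) := by unfold Pre_ttuple; infer_instance
def pvWitness_ttuple : List Int × List Int := ([1, 2, 3], [3, 2, 1])
def Spec_ttuple (ini : List Int) (tar : List Int) (out : Int) : Prop := out = ttuple_alt ini tar
instance (ini : List Int) (tar : List Int) (out : Int) : Decidable (Spec_ttuple ini tar out) := by unfold Spec_ttuple; infer_instance

-- ===== CLAIM (what is proved, stated in full; the proofs are below) =====
def Claim_equal_ttuple : Prop := ∀ (ini : List Int) (tar : List Int), Dom_ttuple ini tar → Pre_ttuple ini tar → Spec_ttuple ini tar (ttuple ini tar)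

-- ===== LEMMAS AND PROOFS =====
-- the core fact over the three difference values
set_option maxHeartbeats 4000000 in
set_option maxRecDepth 8192 in
theorem ttuple_key (x y z : Int) :
    (if x = 0 ∧ y = 0 ∧ z = 0 then (0 : Int)
     else if (x = 0 ∧ y = 0 ∧ z ≠ 0) ∨ (x = 0 ∧ y ≠ 0 ∧ z = 0) ∨ (x ≠ 0 ∧ y = 0 ∧ z = 0) then 1
     else if x = y ∧ y = z then 1
     else if (x = y ∧ y ≠ z) ∨ (x = z ∧ y ≠ z) ∨ (y = z ∧ x ≠ z) then 2
     else if (x = 0 ∧ y ≠ z) ∨ (y = 0 ∧ x ≠ z) ∨ (z = 0 ∧ y ≠ x) then 2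
     else 3) =
    (let counts := ([x, y, z] : List Int).foldl (fun d v => d.insert v (d.getD v 0 + 1)) (PySem.Dict.empty : PySem.Dict Int Int)
     let zc := counts.getD 0 0
     let counts := counts.erase 0
     let sig : List Int := zc :: PySem.List.sorted counts.values (fun x => x) false
     let table : PySem.Dict (List Int) Int :=
       PySem.Dict.ofList [([3], 0), ([2, 1], 1), ([0, 3], 1), ([1, 2], 2), ([1, 1, 1], 2), ([0, 1, 2], 2), ([0, 1, 1, 1], 3)]
     (table.get? sig).getD 0) := by
  by_cases h1 : x = y <;> by_cases h2 : y = z <;> by_cases h3 : x = z <;>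
    by_cases h4 : x = 0 <;> by_cases h5 : y = 0 <;> by_cases h6 : z = 0 <;>
    simp_all [PySem.Dict.insert, PySem.Dict.getD, PySem.Dict.get?, PySem.Dict.erase,
      PySem.Dict.values, PySem.Dict.empty, PySem.Dict.ofList, PySem.Dict.update,
      PySem.List.sorted, PySem.List.insertBy, List.find?, List.foldl, beq_eq_decide, eq_comm (a := (0 : Int))] <;> omega

-- ===== VERDICT (by name: the statement is the Claim_ definition above) =====
theorem ttuple_spec : Claim_equal_ttuple := by
  intro ini tar _ hpre
  obtain ⟨hi, ht⟩ := hpre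
  match ini, tar with
  | a0 :: a1 :: a2 :: _, b0 :: b1 :: b2 :: _ =>
    have hr : PySem.List.pyRange 0 3 1 = [0, 1, 2] := by decide
    unfold Spec_ttuple ttuple ttuple_alt
    rw [hr]
    simp only [List.foldl, PySem.List.pyGet?, PySem.List.pyIdx?]
    norm_num
    exact ttuple_key _ _ _
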